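-- pv_equiv track=rewrite | github.com/przymusp/PatchScope | src/diffannotator/annotate.py | front_fill_gaps
-- ===== SOURCE A (Python) =====
-- from typing import List, Dict, Tuple, TypeVar, Optional, Union
--
-- T = TypeVar('T')
--
-- def front_fill_gaps(data: Dict[int, T]) -> Dict[int, T]:
--     """Fill any gaps in `data` keys with previous value
--
--     >>> front_fill_gaps({1: '1', 3: '3'})
--     {1: '1', 2: '1', 3: '3'}
--
--     :param data: Input data - dictionary with int keys
--     :return: Front filled input data
--     """
--     if not data:
--         return {}
--
--     # Find the minimum and maximum keys
--     min_key = min(data.keys())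
--     max_key = max(data.keys())
--
--     # Create a new dictionary to store the result
--     filled_dict = {}
--
--     # Initialize the previous value
--     previous_value = None
--
--     # Iterate through the range of keys
--     for key in range(min_key, max_key + 1):
--         if key in data:
--             previous_value = data[key]
--         filled_dict[key] = previous_value
--
--     return filled_dict
-- ===== SOURCE B (Python) =====
-- def front_fill_gaps(data):
--     """Fill gaps in integer keys with the previous present value (segment-wise)."""
--     if not data:
--         return {}
--     keys = sorted(data)
--     items = []
--     for ki, kj in zip(keys, keys[1:]):
--         vi = data[ki]
--         for k in range(ki, kj):
--             items.append((k, vi))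
--     last = keys[-1]
--     items.append((last, data[last]))
--     return dict(items)
-- ===== Notes on version B (the rewrite author's own statement) =====
-- stated objective: alternative
-- what changed: Instead of one flat loop over the whole integer range with a per-key membership test into the input dict, B sorts the present keys once and fills each gap segment between adjacent present keys with the left key's value, touching the input dict only once per present key.
import Mathlib
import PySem

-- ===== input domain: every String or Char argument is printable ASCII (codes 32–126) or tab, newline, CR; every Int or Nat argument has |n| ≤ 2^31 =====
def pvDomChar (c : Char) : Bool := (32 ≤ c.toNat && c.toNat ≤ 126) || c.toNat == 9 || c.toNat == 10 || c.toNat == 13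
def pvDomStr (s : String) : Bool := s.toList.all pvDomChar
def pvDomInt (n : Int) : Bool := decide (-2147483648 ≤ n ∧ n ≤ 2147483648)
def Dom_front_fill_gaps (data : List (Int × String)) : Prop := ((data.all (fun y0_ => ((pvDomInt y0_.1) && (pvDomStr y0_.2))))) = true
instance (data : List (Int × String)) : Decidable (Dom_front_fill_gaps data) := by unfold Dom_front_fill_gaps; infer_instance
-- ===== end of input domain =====

-- B fills the range segment-by-segment between adjacent sorted present keys instead of
-- scanning the whole integer range with a membership test per key (objective: alternative).

-- ===== PORT A =====
-- loop body of A: 'if key in data: previous_value = data[key]'; 'filled_dict[key] = previous_value'.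
-- previous_value is never None when stored (the first range key is min_key, present in data),
-- so storing 'prev.getD ""' is exact.
def pvStepA (d : PySem.Dict Int String) (st : PySem.Dict Int String × Option String)
    (key : Int) : PySem.Dict Int String × Option String :=
  let prev := if d.contains key then d.get? key else st.2
  (st.1.insert key (prev.getD ""), prev)

def front_fill_gaps (data : List (Int × String)) : List (Int × String) :=
  let d := PySem.Dict.ofList data
  if d.items = [] then []
  else
    match PySem.List.min? d.keys (fun k => k), PySem.List.max? d.keys (fun k => k) with
    | some minK, some maxK =>
        ((PySem.List.pyRange minK (maxK + 1)).foldl (pvStepA d) (PySem.Dict.empty, none)).1.items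
    | _, _ => []   -- unreachable: d.keys is nonempty here

-- ===== PORT B =====
-- 'vi = data[ki]' never raises (ki is a key of data); d.getD p.1 "" is exact there.
def front_fill_gaps_alt (data : List (Int × String)) : List (Int × String) :=
  let d := PySem.Dict.ofList data
  if d.items = [] then []
  else
    let keys := PySem.List.sorted d.keys (fun k => k)
    let items := (keys.zip keys.tail).foldl
        (fun acc p => acc ++ (PySem.List.pyRange p.1 p.2).map (fun k => (k, d.getD p.1 ""))) []
    match keys.getLast? with
    | some last => (PySem.Dict.ofList (items ++ [(last, d.getD last "")])).items
    | none => []   -- unreachable: keys is nonempty here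

-- ===== PRECONDITION & SPEC =====
def Spec_front_fill_gaps (data : List (Int × String)) (out : List (Int × String)) : Prop := out = front_fill_gaps_alt data
instance (data : List (Int × String)) (out : List (Int × String)) : Decidable (Spec_front_fill_gaps data out) := by unfold Spec_front_fill_gaps; infer_instance

-- ===== CLAIM (what is proved, stated in full; the proofs are below) =====
def Claim_equal_front_fill_gaps : Prop := ∀ (data : List (Int × String)), Dom_front_fill_gaps data → Spec_front_fill_gaps data (front_fill_gaps data)

-- ===== LEMMAS AND PROOFS =====

-- every element of a strictly increasing chain is ≤ its last element
theorem pv_le_getLast?_aux (ks : List Int) : ∀ (k1 last : Int),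
    (k1 :: ks).Pairwise (· < ·) → (k1 :: ks).getLast? = some last →
    ∀ y ∈ k1 :: ks, y ≤ last := by
  induction ks with
  | nil =>
    intro k1 last _ hl y hy
    rw [List.getLast?_singleton, Option.some.injEq] at hl
    rw [List.mem_singleton] at hy
    omega
  | cons k2 rest ih =>
    intro k1 last hp hl y hy
    rw [List.getLast?_cons_cons] at hl
    rcases List.pairwise_cons.mp hp with ⟨hk1, hp'⟩
    rw [List.mem_cons] at hy
    rcases hy with rfl | hy
    · have h2 := ih k2 last hp' hl k2 (List.mem_cons_self ..)
      have := hk1 k2 (List.mem_cons_self ..); omega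
    · exact ih k2 last hp' hl y hy

theorem pv_le_getLast? (ks : List Int) (last : Int)
    (hp : ks.Pairwise (· < ·)) (hl : ks.getLast? = some last) :
    ∀ y ∈ ks, y ≤ last := by
  cases ks with
  | nil => simp at hl
  | cons k1 kt => exact pv_le_getLast?_aux kt k1 last hp hl

-- a dict whose item keys are all < B does not contain any k ≥ B
theorem pv_contains_false_of_bound (f : PySem.Dict Int String) (B : Int)
    (h : ∀ p ∈ f.items, p.1 < B) (k : Int) (hk : B ≤ k) : f.contains k = false := by
  rw [PySem.Dict.contains_eq_decide_mem_keys]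
  simp only [decide_eq_false_iff_not]
  intro hmem
  have : k ∈ f.items.map (·.1) := hmem
  rcases List.mem_map.mp this with ⟨p, hp, hpk⟩
  have := h p hp
  omega

-- on a run of keys absent from d, A's loop just writes the carried value everywhere
theorem pv_run_const (d : PySem.Dict Int String) :
    ∀ (n : Nat) (a b : Int), (b - a).toNat = n →
    (∀ k, a ≤ k → k < b → d.contains k = false) →
    ∀ (filled : PySem.Dict Int String) (v : Option String),
    (PySem.List.pyRange a b).foldl (pvStepA d) (filled, v)
      = ((PySem.List.pyRange a b).foldl (fun f k => f.insert k (v.getD "")) filled, v) := by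
  intro n
  induction n with
  | zero =>
    intro a b hn _ filled v
    have hnil : PySem.List.pyRange a b = [] := by
      rw [List.eq_nil_iff_forall_not_mem]
      intro x hx
      rw [PySem.List.mem_pyRange_one] at hx
      omega
    simp [hnil]
  | succ m ih =>
    intro a b hn hnk filled v
    have hab : a < b := by omega
    rw [PySem.List.pyRange_one_cons hab]
    simp only [List.foldl_cons]
    have hca : d.contains a = false := hnk a le_rfl hab
    have hstep : pvStepA d (filled, v) a = (filled.insert a (v.getD ""), v) := by
      simp [pvStepA, hca]
    rw [hstep]
    exact ih (a + 1) b (by omega) (fun k h1 h2 => hnk k (by omega) h2) _ v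

-- the two-sided characterisation of A's whole loop over sorted present keys:
-- it produces exactly B's segment list followed by the last present key's pair
theorem pv_main (d : PySem.Dict Int String) :
    ∀ (ks : List Int) (k1 last : Int) (filled : PySem.Dict Int String) (prev : Option String),
    (k1 :: ks).Pairwise (· < ·) →
    (k1 :: ks).getLast? = some last →
    (∀ k, k1 ≤ k → (d.contains k = true ↔ k ∈ k1 :: ks)) →
    (∀ p ∈ filled.items, p.1 < k1) →
    ((PySem.List.pyRange k1 (last + 1)).foldl (pvStepA d) (filled, prev)).1.items
      = filled.items
        ++ ((k1 :: ks).zip ks).flatMap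
             (fun p => (PySem.List.pyRange p.1 p.2).map (fun k => (k, d.getD p.1 "")))
        ++ [(last, d.getD last "")] := by
  intro ks
  induction ks with
  | nil =>
    intro k1 last filled prev hp hl hiff hf
    simp only [List.getLast?_singleton, Option.some.injEq] at hl
    subst hl
    have h1 : PySem.List.pyRange k1 (k1 + 1) = [k1] := by
      rw [PySem.List.pyRange_one_cons (by omega)]
      have : PySem.List.pyRange (k1 + 1) (k1 + 1) = [] := by
        rw [List.eq_nil_iff_forall_not_mem]
        intro x hx; rw [PySem.List.mem_pyRange_one] at hx; omega
      rw [this]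
    have hc : d.contains k1 = true := (hiff k1 le_rfl).mpr (by simp)
    have hnc : filled.contains k1 = false := pv_contains_false_of_bound filled k1 hf k1 le_rfl
    rw [h1]
    simp only [List.foldl_cons, List.foldl_nil, pvStepA, hc, if_true]
    rw [PySem.Dict.items_insert_of_not_contains filled _ hnc]
    simp [PySem.Dict.getD_eq_get?_getD]
  | cons k2 rest ih =>
    intro k1 last filled prev hp hl hiff hf
    rw [List.getLast?_cons_cons] at hl
    rcases List.pairwise_cons.mp hp with ⟨hk1lt, hp'⟩
    have h12 : k1 < k2 := hk1lt k2 (by simp)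
    have h2last : k2 ≤ last := pv_le_getLast? (k2 :: rest) last hp' hl k2 (List.mem_cons_self ..)
    -- split the range at k2
    rw [PySem.List.pyRange_one_append k1 k2 (last + 1) (by omega) (by omega),
        List.foldl_append]
    -- first segment: k1 then the gap (k1+1 … k2-1)
    rw [PySem.List.pyRange_one_cons h12]
    simp only [List.foldl_cons]
    have hc1 : d.contains k1 = true := (hiff k1 le_rfl).mpr (by simp)
    have hstep : pvStepA d (filled, prev) k1 = (filled.insert k1 ((d.get? k1).getD ""), d.get? k1) := by
      simp [pvStepA, hc1]
    rw [hstep]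
    have hgap : ∀ k, k1 + 1 ≤ k → k < k2 → d.contains k = false := by
      intro k hk1 hk2
      cases hcc : d.contains k with
      | false => rfl
      | true =>
        exfalso
        have hm := (hiff k (by omega)).mp hcc
        rw [List.mem_cons, List.mem_cons] at hm
        rcases hm with rfl | rfl | hm
        · omega
        · omega
        · have := (List.pairwise_cons.mp hp').1 k hm; omega
    rw [pv_run_const d (k2 - (k1 + 1)).toNat (k1 + 1) k2 rfl hgap _ (d.get? k1)]
    -- the gap fold is a fresh-keys insert fold; compute its items
    have hbase : (filled.insert k1 ((d.get? k1).getD "")).items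
        = filled.items ++ [(k1, (d.get? k1).getD "")] :=
      PySem.Dict.items_insert_of_not_contains filled _
        (pv_contains_false_of_bound filled k1 hf k1 le_rfl)
    have hfresh : ∀ a ∈ PySem.List.pyRange (k1 + 1) k2,
        (filled.insert k1 ((d.get? k1).getD "")).contains a = false := by
      intro a ha
      rw [PySem.List.mem_pyRange_one] at ha
      apply pv_contains_false_of_bound _ (k1 + 1) _ a (by omega)
      intro p hp'
      rw [hbase] at hp'
      rcases List.mem_append.mp hp' with h | h
      · have := hf p h; omega
      · rw [List.mem_singleton] at h; subst h; exact lt_add_one k1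
    have hitems := PySem.Dict.items_foldl_insert_fresh (PySem.List.pyRange (k1 + 1) k2)
        (fun a => a) (fun _ => (d.get? k1).getD "") (filled.insert k1 ((d.get? k1).getD ""))
        hfresh (by simpa using PySem.List.nodup_pyRange_one (k1 + 1) k2)
    set filled2 := (PySem.List.pyRange (k1 + 1) k2).foldl
        (fun f k => f.insert k ((d.get? k1).getD "")) (filled.insert k1 ((d.get? k1).getD "")) with hf2
    have hitems2 : filled2.items = filled.items
        ++ [(k1, (d.get? k1).getD "")]
        ++ (PySem.List.pyRange (k1 + 1) k2).map (fun k => (k, (d.get? k1).getD "")) := by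
      rw [hf2, hitems, hbase]
    -- apply the induction hypothesis to the rest of the chain
    have hbound2 : ∀ p ∈ filled2.items, p.1 < k2 := by
      intro p hp2
      rw [hitems2] at hp2
      rcases List.mem_append.mp hp2 with h | h
      · rcases List.mem_append.mp h with h | h
        · have := hf p h; omega
        · rw [List.mem_singleton] at h; subst h
          exact lt_of_le_of_lt (le_refl k1) h12
      · rcases List.mem_map.mp h with ⟨k, hk, hkp⟩
        rw [PySem.List.mem_pyRange_one] at hk
        subst hkp; simpa using hk.2
    have hiff2 : ∀ k, k2 ≤ k → (d.contains k = true ↔ k ∈ k2 :: rest) := by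
      intro k hk
      rw [hiff k (by omega), List.mem_cons]
      constructor
      · rintro (rfl | h)
        · exact absurd hk (by omega)
        · exact h
      · intro h; exact Or.inr h
    have hrec := ih k2 last filled2 (d.get? k1) hp' hl hiff2 hbound2
    rw [hrec, hitems2]
    -- assemble: segment (k1,k2) contributes pyRange k1 k2 with value d.getD k1 ""
    have hseg : (PySem.List.pyRange k1 k2).map (fun k => (k, d.getD k1 ""))
        = (k1, (d.get? k1).getD "")
          :: (PySem.List.pyRange (k1 + 1) k2).map (fun k => (k, (d.get? k1).getD "")) := by
      rw [PySem.List.pyRange_one_cons h12, List.map_cons, PySem.Dict.getD_eq_get?_getD]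
    simp only [List.zip_cons_cons, List.flatMap_cons, hseg]
    simp [List.append_assoc]

-- the segment ranges tile the whole range (used for B's final dict(items) step)
theorem pv_range_decomp :
    ∀ (ks : List Int) (k1 last : Int),
    (k1 :: ks).Pairwise (· < ·) →
    (k1 :: ks).getLast? = some last →
    ((k1 :: ks).zip ks).flatMap (fun p => PySem.List.pyRange p.1 p.2) ++ [last]
      = PySem.List.pyRange k1 (last + 1) := by
  intro ks
  induction ks with
  | nil =>
    intro k1 last hp hl
    simp only [List.getLast?_singleton, Option.some.injEq] at hl
    subst hl
    have h1 : PySem.List.pyRange k1 (k1 + 1) = [k1] := by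
      rw [PySem.List.pyRange_one_cons (by omega)]
      have : PySem.List.pyRange (k1 + 1) (k1 + 1) = [] := by
        rw [List.eq_nil_iff_forall_not_mem]
        intro x hx; rw [PySem.List.mem_pyRange_one] at hx; omega
      rw [this]
    simp [h1]
  | cons k2 rest ih =>
    intro k1 last hp hl
    rw [List.getLast?_cons_cons] at hl
    rcases List.pairwise_cons.mp hp with ⟨hk1lt, hp'⟩
    have h12 : k1 < k2 := hk1lt k2 (by simp)
    have h2last : k2 ≤ last := pv_le_getLast? (k2 :: rest) last hp' hl k2 (List.mem_cons_self ..)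
    have hrec := ih k2 last hp' hl
    rw [PySem.List.pyRange_one_append k1 k2 (last + 1) (by omega) (by omega)]
    simp only [List.zip_cons_cons, List.flatMap_cons, List.append_assoc, hrec]

-- strict pairwise order on the sorted key list
theorem pv_sorted_lt (keys : List Int) (hnd : keys.Nodup) :
    (PySem.List.sorted keys (fun k => k)).Pairwise (· < ·) := by
  have h1 := PySem.List.sorted_pairwise keys (fun k => k)
  have hnd' : (PySem.List.sorted keys (fun k => k)).Nodup :=
    (PySem.List.sorted_perm keys (fun k => k) false).nodup_iff.mpr hnd
  have h2 : (PySem.List.sorted keys (fun k => k)).Pairwise (· ≠ ·) := hnd'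
  exact (h1.and h2).imp (fun h => lt_of_le_of_ne h.1 h.2)

-- ===== VERDICT (by name: the statement is the Claim_ definition above) =====
theorem front_fill_gaps_spec : Claim_equal_front_fill_gaps := by
  intro data _
  unfold Spec_front_fill_gaps front_fill_gaps front_fill_gaps_alt
  set d := PySem.Dict.ofList data with hd
  by_cases hemp : d.items = []
  · simp [hemp]
  · simp only [hemp, if_false]
    have hkeysne : d.keys ≠ [] := by
      intro h
      have : d.items.map (·.1) = [] := h
      exact hemp (List.map_eq_nil_iff.mp this)
    set ks := PySem.List.sorted d.keys (fun k => k) with hks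
    have hperm : ks.Perm d.keys := PySem.List.sorted_perm _ _ _
    have hksne : ks ≠ [] := by
      intro h
      rw [hks] at h
      exact hkeysne ((PySem.List.sorted_eq_nil_iff _ _ _).mp h)
    have hnd : d.keys.Nodup := PySem.Dict.nodup_keys_ofList data
    have hlt : ks.Pairwise (· < ·) := pv_sorted_lt d.keys hnd
    obtain ⟨k1, kt, hcons⟩ := List.exists_cons_of_ne_nil hksne
    obtain ⟨last, hlast⟩ : ∃ last, ks.getLast? = some last := by
      cases h : ks.getLast? with
      | none => exact absurd (List.getLast?_eq_none_iff.mp h) hksne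
      | some l => exact ⟨l, rfl⟩
    have hmemks : ∀ k, k ∈ ks ↔ k ∈ d.keys := fun k => hperm.mem_iff
    have hiff : ∀ k, d.contains k = true ↔ k ∈ ks := by
      intro k
      rw [PySem.Dict.contains_eq_decide_mem_keys, decide_eq_true_eq, hmemks]
    -- min? d.keys = head of ks, max? d.keys = last of ks
    have hk1mem : k1 ∈ d.keys := (hmemks k1).mp (hcons ▸ List.mem_cons_self ..)
    have hlastmem : last ∈ d.keys := (hmemks last).mp (List.mem_of_getLast? hlast)
    have hk1min : ∀ y ∈ d.keys, k1 ≤ y := by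
      intro y hy
      have hyks : y ∈ ks := (hmemks y).mpr hy
      rw [hcons] at hyks hlt
      rw [List.mem_cons] at hyks
      rcases hyks with rfl | h
      · omega
      · have := (List.pairwise_cons.mp hlt).1 y h; omega
    have hlastmax : ∀ y ∈ d.keys, y ≤ last := fun y hy =>
      pv_le_getLast? ks last hlt hlast y ((hmemks y).mpr hy)

    have hmin : PySem.List.min? d.keys (fun k => k) = some k1 := by
      cases hm : PySem.List.min? d.keys (fun k => k) with
      | none => exact absurd ((PySem.List.min?_eq_none_iff _ _).mp hm) hkeysne
      | some m =>
        have h1 : m ≤ k1 := PySem.List.min?_isMin hm k1 hk1mem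
        have h2 : k1 ≤ m := hk1min m (PySem.List.min?_mem hm)
        have : m = k1 := le_antisymm h1 h2
        rw [this]
    have hmax : PySem.List.max? d.keys (fun k => k) = some last := by
      cases hm : PySem.List.max? d.keys (fun k => k) with
      | none => exact absurd ((PySem.List.max?_eq_none_iff _ _).mp hm) hkeysne
      | some m =>
        have h1 : last ≤ m := PySem.List.max?_isMax hm last hlastmem
        have h2 : m ≤ last := hlastmax m (PySem.List.max?_mem hm)
        have : m = last := le_antisymm h2 h1
        rw [this]
    rw [hmin, hmax]
    simp only [hcons, hcons ▸ hlast, List.tail_cons]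
    -- A's side via pv_main
    have hiff' : ∀ k, k1 ≤ k → (d.contains k = true ↔ k ∈ k1 :: kt) := by
      intro k _; rw [hiff k, hcons]
    have hA := pv_main d kt k1 last PySem.Dict.empty none (hcons ▸ hlt) (hcons ▸ hlast)
      hiff' (by intro p hp; exact absurd hp (List.not_mem_nil))
    have hempitems : (PySem.Dict.empty : PySem.Dict Int String).items = [] := rfl
    rw [hempitems] at hA
    simp only [List.nil_append] at hA
    rw [hA]
    -- B's side: the foldl is the flatMap, and dict(items) keeps the items list
    rw [PySem.List.foldl_append_eq_flatMap]
    simp only [List.nil_append]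
    set F := ((k1 :: kt).zip kt).flatMap
        (fun p => (PySem.List.pyRange p.1 p.2).map (fun k => (k, d.getD p.1 ""))) with hF
    set L := F ++ [(last, d.getD last "")] with hL
    have hmapfst : L.map (·.1) = PySem.List.pyRange k1 (last + 1) := by
      rw [hL, hF, List.map_append, List.map_flatMap]
      have : ∀ p : Int × Int,
          ((PySem.List.pyRange p.1 p.2).map (fun k => (k, d.getD p.1 ""))).map (·.1)
            = PySem.List.pyRange p.1 p.2 := by
        intro p; rw [List.map_map]; exact List.map_id _
      simp only [this]
      simpa using pv_range_decomp kt k1 last (hcons ▸ hlt) (hcons ▸ hlast)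
    have hndL : (L.map (·.1)).Nodup := by
      rw [hmapfst]; exact PySem.List.nodup_pyRange_one _ _
    have hofL : (PySem.Dict.ofList L).items = L := by
      have h0 : (PySem.Dict.ofList L) = L.foldl (fun f p => f.insert p.1 p.2) PySem.Dict.empty := rfl
      rw [h0, PySem.Dict.items_foldl_insert_fresh L (·.1) (·.2) PySem.Dict.empty
        (fun a _ => by rfl) hndL]
      simp [hempitems]
    rw [hofL]
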